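-- pv_equiv track=rewrite | github.com/Reinborn/text2csg | dataset/csg_tokenizer.py | tokens_to_region_v3
-- ===== SOURCE A (Python) =====
-- TOKEN_TYPE = {
--     "intersect": 0,
--     "union": 1,
--     "difference": 2,
--     "halfspace": 3,
--     "start_cell": 4,
--     "end_cell": 5
-- }
--
-- def tokens_to_region_v3(tokens):
--     stack = []
--     groups = []
--     current_group = []
--
--     for t in tokens:
--         t_type = t[0]
--         if t_type == TOKEN_TYPE["halfspace"]:
--             sid = t[5]
--             sign = t[2]
--             lit = f"-{sid}" if sign == 0 else f"{sid}"
--             current_group.append(lit)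
--         elif t_type == TOKEN_TYPE["intersect"]:
--             if current_group:
--                 groups.append(f"({' '.join(current_group)})")
--                 current_group = []
--         elif t_type == TOKEN_TYPE["union"]:
--             if current_group:
--                 groups.append(f"({' '.join(current_group)})")
--                 current_group = []
--     if current_group:
--         groups.append(f"({' '.join(current_group)})")
--     return f"({' | '.join(groups)})" if len(groups) > 1 else groups[0]
-- ===== SOURCE B (Python) =====
-- def tokens_to_region_v3(tokens):
--     # Pass 1: split the token stream into chunks at every intersect/union token.
--     chunks, cur = [], []
--     for t in tokens:
--         if t[0] == 0 or t[0] == 1: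
--             chunks.append(cur)
--             cur = []
--         else:
--             cur.append(t)
--     chunks.append(cur)
--     # Pass 2: literals of each chunk; Pass 3: format the chunks that produced literals.
--     lit_lists = [['-%d' % t[5] if t[2] == 0 else '%d' % t[5] for t in c if t[0] == 3]
--                  for c in chunks]
--     parts = ['(' + ' '.join(ls) + ')' for ls in lit_lists if ls]
--     return '(' + ' | '.join(parts) + ')' if len(parts) > 1 else parts[0]
-- ===== Notes on version B (the rewrite author's own statement) =====
-- stated objective: alternative
-- what changed: A's single fused loop with a groups/current_group accumulator is replaced by a three-pass pipeline: split the token stream into chunks at every intersect/union token, map each chunk to its halfspace-literal list, then format and join only the chunks that produced literals.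
import Mathlib
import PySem

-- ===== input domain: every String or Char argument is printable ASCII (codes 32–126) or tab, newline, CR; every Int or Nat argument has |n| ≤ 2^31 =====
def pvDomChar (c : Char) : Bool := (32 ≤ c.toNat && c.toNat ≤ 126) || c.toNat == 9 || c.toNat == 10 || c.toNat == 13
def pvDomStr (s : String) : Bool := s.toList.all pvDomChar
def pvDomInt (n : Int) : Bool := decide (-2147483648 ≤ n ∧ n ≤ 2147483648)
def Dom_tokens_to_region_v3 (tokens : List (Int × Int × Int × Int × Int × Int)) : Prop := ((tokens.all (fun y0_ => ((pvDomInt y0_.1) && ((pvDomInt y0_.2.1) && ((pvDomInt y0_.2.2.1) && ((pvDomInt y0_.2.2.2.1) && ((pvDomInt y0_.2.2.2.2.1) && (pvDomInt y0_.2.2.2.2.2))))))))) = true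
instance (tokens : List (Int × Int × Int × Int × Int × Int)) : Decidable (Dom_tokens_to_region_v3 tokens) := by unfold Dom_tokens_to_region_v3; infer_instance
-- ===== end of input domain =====

-- B replaces A's fused loop by a three-pass decomposition (split into chunks at
-- intersect/union, extract literals per chunk, format the nonempty ones); same cost,
-- objective: alternative decomposition.  Equivalence is about the return value only.

-- ===== PORT A =====
-- lit = f"-{sid}" if sign == 0 else f"{sid}"
def pvLitA (sign sid : Int) : String :=
  if sign = 0 then "-" ++ PySem.Int.toStr sid else PySem.Int.toStr sid

-- the for-loop of A, state = (groups, current_group), plus the trailing flush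
def pvLoopA : List (Int × Int × Int × Int × Int × Int) → List String → List String → List String
  | [], groups, cur =>
      if cur ≠ [] then groups ++ ["(" ++ PySem.Str.join " " cur ++ ")"] else groups
  | t :: ts, groups, cur =>
      if t.1 = 3 then
        pvLoopA ts groups (cur ++ [pvLitA t.2.2.1 t.2.2.2.2.2])
      else if t.1 = 0 then
        (if cur ≠ [] then pvLoopA ts (groups ++ ["(" ++ PySem.Str.join " " cur ++ ")"]) []
         else pvLoopA ts groups cur)
      else if t.1 = 1 then
        (if cur ≠ [] then pvLoopA ts (groups ++ ["(" ++ PySem.Str.join " " cur ++ ")"]) []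
         else pvLoopA ts groups cur)
      else pvLoopA ts groups cur

def tokens_to_region_v3 (tokens : List (Int × Int × Int × Int × Int × Int)) : String :=
  let groups := pvLoopA tokens [] []
  if groups.length > 1 then "(" ++ PySem.Str.join " | " groups ++ ")" else groups.headD ""

-- ===== PORT B =====
-- pass 1: split at intersect/union tokens, state = (chunks, cur)
def pvSplitB : List (Int × Int × Int × Int × Int × Int) →
    List (List (Int × Int × Int × Int × Int × Int)) → List (Int × Int × Int × Int × Int × Int) →
    List (List (Int × Int × Int × Int × Int × Int))
  | [], chunks, cur => chunks ++ [cur]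
  | t :: ts, chunks, cur =>
      if t.1 = 0 ∨ t.1 = 1 then pvSplitB ts (chunks ++ [cur]) []
      else pvSplitB ts chunks (cur ++ [t])

-- pass 2: the literal list of one chunk
def pvLitsB (c : List (Int × Int × Int × Int × Int × Int)) : List String :=
  (c.filter (fun t => t.1 = 3)).map
    (fun t => if t.2.2.1 = 0 then "-" ++ PySem.Int.toStr t.2.2.2.2.2
              else PySem.Int.toStr t.2.2.2.2.2)

-- pass 3: keep and format the chunks that produced literals
def pvPartsB (chunks : List (List (Int × Int × Int × Int × Int × Int))) : List String :=
  (chunks.map pvLitsB).filterMap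
    (fun ls => if ls = [] then none else some ("(" ++ PySem.Str.join " " ls ++ ")"))

def tokens_to_region_v3_alt (tokens : List (Int × Int × Int × Int × Int × Int)) : String :=
  let parts := pvPartsB (pvSplitB tokens [] [])
  if parts.length > 1 then "(" ++ PySem.Str.join " | " parts ++ ")" else parts.headD ""

-- ===== PRECONDITION & SPEC =====
-- Pre_ excludes exactly the inputs with no halfspace token, on which the Python A
-- (and the Python B) raises IndexError (groups[0] on an empty list).
def Pre_tokens_to_region_v3 (tokens : List (Int × Int × Int × Int × Int × Int)) : Prop :=
  ∃ t ∈ tokens, t.1 = 3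
instance (tokens : List (Int × Int × Int × Int × Int × Int)) : Decidable (Pre_tokens_to_region_v3 tokens) := by unfold Pre_tokens_to_region_v3; infer_instance

def pvWitness_tokens_to_region_v3 : (List (Int × Int × Int × Int × Int × Int)) :=
  [(3, 0, 0, 0, 0, 7), (1, 0, 0, 0, 0, 0), (3, 0, 1, 0, 0, 5)]

def Spec_tokens_to_region_v3 (tokens : List (Int × Int × Int × Int × Int × Int)) (out : String) : Prop := out = tokens_to_region_v3_alt tokens
instance (tokens : List (Int × Int × Int × Int × Int × Int)) (out : String) : Decidable (Spec_tokens_to_region_v3 tokens out) := by unfold Spec_tokens_to_region_v3; infer_instance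

-- ===== CLAIM (what is proved, stated in full; the proofs are below) =====
def Claim_equal_tokens_to_region_v3 : Prop := ∀ (tokens : List (Int × Int × Int × Int × Int × Int)), Dom_tokens_to_region_v3 tokens → Pre_tokens_to_region_v3 tokens → Spec_tokens_to_region_v3 tokens (tokens_to_region_v3 tokens)

-- ===== LEMMAS AND PROOFS =====

-- pvSplitB only ever appends to its chunk accumulator
theorem pvSplitB_acc (ts : List (Int × Int × Int × Int × Int × Int))
    (chunks : List (List (Int × Int × Int × Int × Int × Int)))
    (cur : List (Int × Int × Int × Int × Int × Int)) :
    pvSplitB ts chunks cur = chunks ++ pvSplitB ts [] cur := by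
  induction ts generalizing chunks cur with
  | nil => simp [pvSplitB]
  | cons t ts ih =>
    simp only [pvSplitB]
    split
    · rw [ih (chunks ++ [cur]) [], ih ([] ++ [cur]) []]; simp
    · exact ih chunks (cur ++ [t])

theorem pvPartsB_append (xs ys : List (List (Int × Int × Int × Int × Int × Int))) :
    pvPartsB (xs ++ ys) = pvPartsB xs ++ pvPartsB ys := by
  simp [pvPartsB]

theorem pvLitsB_nil : pvLitsB [] = [] := by simp [pvLitsB]

-- the loop of A computes exactly the parts of B's split, for any agreeing state
theorem pvLoopA_eq (ts : List (Int × Int × Int × Int × Int × Int))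
    (groups : List String) (cur : List (Int × Int × Int × Int × Int × Int)) :
    pvLoopA ts groups (pvLitsB cur) = groups ++ pvPartsB (pvSplitB ts [] cur) := by
  induction ts generalizing groups cur with
  | nil =>
    simp only [pvLoopA, pvSplitB, pvPartsB]
    by_cases h : pvLitsB cur = [] <;> simp [h]
  | cons t ts ih =>
    simp only [pvLoopA, pvSplitB]
    by_cases h3 : t.1 = 3
    · have hnd : ¬ (t.1 = 0 ∨ t.1 = 1) := by omega
      simp only [h3, if_true]
      have : pvLitsB cur ++ [pvLitA t.2.2.1 t.2.2.2.2.2] = pvLitsB (cur ++ [t]) := by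
        simp [pvLitsB, h3, pvLitA]
      rw [this]; exact ih groups (cur ++ [t])
    · by_cases hd : t.1 = 0 ∨ t.1 = 1
      · have hsplit : pvSplitB ts ([] ++ [cur]) [] = [cur] ++ pvSplitB ts [] [] := by
          simpa using pvSplitB_acc ts [cur] []
        by_cases hc : pvLitsB cur = []
        · simp only [h3, if_false, hd, if_true, hc]
          rcases hd with h0 | h1
          · simp only [h0, if_true, ne_eq, not_true_eq_false, if_false]
            have := ih groups ([] : List (Int × Int × Int × Int × Int × Int))
            rw [pvLitsB_nil] at this
            rw [this, hsplit, pvPartsB_append]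
            simp [pvPartsB, hc]
          · have h0 : ¬ t.1 = 0 := by omega
            simp only [if_false, h1, if_true, ne_eq, not_true_eq_false]
            have := ih groups ([] : List (Int × Int × Int × Int × Int × Int))
            rw [pvLitsB_nil] at this
            rw [this, hsplit, pvPartsB_append]
            simp [pvPartsB, hc]
        · simp only [h3, if_false, hd, if_true]
          have key : pvLoopA ts (groups ++ ["(" ++ PySem.Str.join " " (pvLitsB cur) ++ ")"]) [] =
              groups ++ pvPartsB (pvSplitB ts ([] ++ [cur]) []) := by
            have := ih (groups ++ ["(" ++ PySem.Str.join " " (pvLitsB cur) ++ ")"])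
              ([] : List (Int × Int × Int × Int × Int × Int))
            rw [pvLitsB_nil] at this
            rw [this, hsplit, pvPartsB_append]
            simp [pvPartsB, hc]
          rcases hd with h0 | h1
          · simp only [h0, if_true, ne_eq, hc, not_false_eq_true, if_true]
            exact key
          · have h0 : ¬ t.1 = 0 := by omega
            simp only [h1, if_true, ne_eq, hc, not_false_eq_true]
            exact key
      · have h0 : ¬ t.1 = 0 := by tauto
        have h1 : ¬ t.1 = 1 := by tauto
        simp only [h3, if_false, h0, h1]
        have : pvLitsB cur = pvLitsB (cur ++ [t]) := by
          simp [pvLitsB, h3]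
        rw [this]; exact ih groups (cur ++ [t])

-- ===== VERDICT (by name: the statement is the Claim_ definition above) =====
theorem tokens_to_region_v3_spec : Claim_equal_tokens_to_region_v3 := by
  intro tokens _ _
  unfold Spec_tokens_to_region_v3 tokens_to_region_v3 tokens_to_region_v3_alt
  have h := pvLoopA_eq tokens [] []
  rw [pvLitsB_nil, List.nil_append] at h
  rw [h]
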